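-- pv_equiv track=rewrite | github.com/MrBrantCode/unitest_baseline | mut_generate/mist_train_taco/taco_7921/solution.py | find_max_p
-- ===== SOURCE A (Python) =====
-- def find_max_p(b: int, d: int, a: str, c: str) -> int:
--     cnt = [0] * len(c)
--     nxt = [0] * len(c)
--
--     for i in range(len(c)):
--         pos = i
--         for j in range(len(a)):
--             if a[j] == c[pos]:
--                 pos += 1
--                 if pos == len(c):
--                     cnt[i] += 1
--                     pos = 0
--         nxt[i] = pos
--
--     ans = 0
--     poss = 0
--
--     for _ in range(b):
--         ans += cnt[poss]
--         poss = nxt[poss]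
--
--     return ans // d
-- ===== SOURCE B (Python) =====
-- def find_max_p(b: int, d: int, a: str, c: str) -> int:
--     m = len(c)
--     cnt = [0] * m
--     nxt = [0] * m
--     for i in range(m):
--         pos = i
--         for j in range(len(a)):
--             if a[j] == c[pos]:
--                 pos += 1
--                 if pos == m:
--                     cnt[i] += 1
--                     pos = 0
--         nxt[i] = pos
--     if b <= 0:
--         return 0 // d
--     # walk the poss-transition graph once, recording first-visit times and
--     # prefix sums, until a state repeats (cycle found) or b steps are done
--     first = {}
--     prefix = [0]
--     s = 0
--     t = 0
--     while s not in first and t < b: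
--         first[s] = t
--         prefix.append(prefix[-1] + cnt[s])
--         s = nxt[s]
--         t += 1
--     if t == b:
--         return prefix[t] // d
--     t1 = first[s]
--     p = t - t1
--     cyc = prefix[t] - prefix[t1]
--     q = (b - t1) // p
--     r = (b - t1) - q * p
--     return (prefix[t1] + q * cyc + (prefix[t1 + r] - prefix[t1])) // d
-- ===== Notes on version B (the rewrite author's own statement) =====
-- stated objective: alternative
-- what changed: The second phase no longer iterates b times over the poss-transition table: B walks the transition graph once recording first-visit times and prefix sums, detects the cycle, and computes the answer in closed form from the pre-cycle prefix, the number of full cycles and the remainder (O(len(c)) instead of O(b) for that phase; a timing run's inputs grow the strings, not b, so it measured no speed-up).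
import Mathlib
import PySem

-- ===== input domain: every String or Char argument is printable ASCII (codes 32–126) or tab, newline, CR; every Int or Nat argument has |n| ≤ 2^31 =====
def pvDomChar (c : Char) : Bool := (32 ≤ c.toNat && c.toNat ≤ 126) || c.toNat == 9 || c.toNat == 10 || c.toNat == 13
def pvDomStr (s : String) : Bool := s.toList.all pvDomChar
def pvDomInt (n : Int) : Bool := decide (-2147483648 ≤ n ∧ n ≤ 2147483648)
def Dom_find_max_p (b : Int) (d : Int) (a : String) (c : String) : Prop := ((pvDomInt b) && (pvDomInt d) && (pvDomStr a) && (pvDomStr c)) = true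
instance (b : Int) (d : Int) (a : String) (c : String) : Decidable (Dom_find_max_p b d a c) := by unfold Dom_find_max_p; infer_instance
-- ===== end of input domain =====

-- B replaces A's b-step simulation of the poss-transition table by one walk that detects the
-- cycle and evaluates the sum in closed form; equal wherever A returns.


-- ===== PORT A =====
-- phase 1 (identical source text in A and in B, so shared): one pass of a from start
-- position i; pos stays in [0, len c), so pyGetD is exact here.
def pvRow (as_ cs : List Char) (i : Int) : Int × Int :=
  (PySem.List.pyRange 0 (as_.length : Int) 1).foldl
    (fun (st : Int × Int) j =>
      if PySem.List.pyGetD as_ j ' ' = PySem.List.pyGetD cs st.2 ' ' then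
        (if st.2 + 1 = (cs.length : Int) then (st.1 + 1, 0) else (st.1, st.2 + 1))
      else st)
    (0, i)

def pvCnt (as_ cs : List Char) : List Int :=
  (PySem.List.pyRange 0 (cs.length : Int) 1).map (fun i => (pvRow as_ cs i).1)

def pvNxt (as_ cs : List Char) : List Int :=
  (PySem.List.pyRange 0 (cs.length : Int) 1).map (fun i => (pvRow as_ cs i).2)

-- cnt[poss] / nxt[poss]: poss is always in range under Pre_ (it is 0 or an entry of nxt), so pyGetD is exact.
def find_max_p (b : Int) (d : Int) (a : String) (c : String) : Int :=
  let as_ := a.toList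
  let cs := c.toList
  let cnt := pvCnt as_ cs
  let nxt := pvNxt as_ cs
  let fin := (PySem.List.pyRange 0 b 1).foldl
    (fun (st : Int × Int) _ =>
      (st.1 + PySem.List.pyGetD cnt st.2 0, PySem.List.pyGetD nxt st.2 0))
    (0, 0)
  PySem.Int.floordiv fin.1 d

-- ===== PORT B =====
-- the while loop of Source B; the fuel (len c + 1) is an upper bound on its iteration count
-- (each iteration inserts a fresh key from the len c possible states), never reached.
def pvLoopB (cnt nxt : List Int) (b : Int) :
    Nat → PySem.Dict Int Int → List Int → Int → Int →
    PySem.Dict Int Int × List Int × Int × Int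
  | 0, first, pre, s, t => (first, pre, s, t)
  | fuel + 1, first, pre, s, t =>
    if first.get? s = none ∧ t < b then
      pvLoopB cnt nxt b fuel (first.insert s t)
        (pre ++ [PySem.List.pyGetD pre (-1) 0 + PySem.List.pyGetD cnt s 0])
        (PySem.List.pyGetD nxt s 0) (t + 1)
    else (first, pre, s, t)

-- the code after the while loop; first[s] is present in the else branch, so getD is exact.
def pvFinish (b d : Int) (res : PySem.Dict Int Int × List Int × Int × Int) : Int :=
  match res with
  | (first, pre, s, t) =>
    if t = b then PySem.Int.floordiv (PySem.List.pyGetD pre t 0) d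
    else
      let t1 := (first.get? s).getD 0
      let p := t - t1
      let cyc := PySem.List.pyGetD pre t 0 - PySem.List.pyGetD pre t1 0
      let q := PySem.Int.floordiv (b - t1) p
      let r := (b - t1) - q * p
      PySem.Int.floordiv
        (PySem.List.pyGetD pre t1 0 + q * cyc +
          (PySem.List.pyGetD pre (t1 + r) 0 - PySem.List.pyGetD pre t1 0)) d

def find_max_p_alt (b : Int) (d : Int) (a : String) (c : String) : Int :=
  let as_ := a.toList
  let cs := c.toList
  let cnt := pvCnt as_ cs
  let nxt := pvNxt as_ cs
  if b ≤ 0 then PySem.Int.floordiv 0 d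
  else
    pvFinish b d
      (pvLoopB cnt nxt b (cs.length + 1) (PySem.Dict.empty : PySem.Dict Int Int) [0] 0 0)

-- ===== PRECONDITION & SPEC =====
-- Pre_ excludes exactly the inputs where Python A raises: d = 0 (ZeroDivisionError) and
-- c = "" with b > 0 (IndexError on cnt[poss]).
def Pre_find_max_p (b : Int) (d : Int) (a : String) (c : String) : Prop :=
  d ≠ 0 ∧ (b ≤ 0 ∨ c.toList ≠ [])
instance (b : Int) (d : Int) (a : String) (c : String) : Decidable (Pre_find_max_p b d a c) := by
  unfold Pre_find_max_p; infer_instance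

def pvWitness_find_max_p : Int × Int × String × String := (5, 2, "abab", "ab")

def Spec_find_max_p (b : Int) (d : Int) (a : String) (c : String) (out : Int) : Prop := out = find_max_p_alt b d a c
instance (b : Int) (d : Int) (a : String) (c : String) (out : Int) : Decidable (Spec_find_max_p b d a c out) := by unfold Spec_find_max_p; infer_instance

-- ===== CLAIM (what is proved, stated in full; the proofs are below) =====
def Claim_equal_find_max_p : Prop := ∀ (b : Int) (d : Int) (a : String) (c : String), Dom_find_max_p b d a c → Pre_find_max_p b d a c → Spec_find_max_p b d a c (find_max_p b d a c)

-- ===== LEMMAS AND PROOFS =====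

-- the transition function and the step-count sums the two phases realize
def pvG (as_ cs : List Char) (s : Int) : Int := PySem.List.pyGetD (pvNxt as_ cs) s 0
def pvW (as_ cs : List Char) (s : Int) : Int := PySem.List.pyGetD (pvCnt as_ cs) s 0
def pvIt (as_ cs : List Char) (k : Nat) : Int := (pvG as_ cs)^[k] 0
def pvSum (as_ cs : List Char) : Nat → Int → Int
  | 0, _ => 0
  | n + 1, s => pvW as_ cs s + pvSum as_ cs n (pvG as_ cs s)

lemma pvSum_add (as_ cs : List Char) (m n : Nat) (s : Int) :
    pvSum as_ cs (m + n) s = pvSum as_ cs m s + pvSum as_ cs n ((pvG as_ cs)^[m] s) := by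
  induction m generalizing s with
  | zero => simp [pvSum]
  | succ m ih =>
      have h : m + 1 + n = (m + n) + 1 := by omega
      rw [h]
      show pvW as_ cs s + pvSum as_ cs (m + n) (pvG as_ cs s) = _
      rw [ih, Function.iterate_succ_apply]
      show _ = pvW as_ cs s + pvSum as_ cs m (pvG as_ cs s) + _
      ring

lemma pvSum_cycle (as_ cs : List Char) (p : Nat) (s : Int)
    (hp : (pvG as_ cs)^[p] s = s) (q r : Nat) :
    pvSum as_ cs (q * p + r) s = (q : Int) * pvSum as_ cs p s + pvSum as_ cs r s := by
  induction q with
  | zero => simp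
  | succ q ih =>
      have h : (q + 1) * p + r = p + (q * p + r) := by ring
      rw [h, pvSum_add, hp, ih]
      push_cast; ring

lemma foldA (as_ cs : List Char) (l : List Int) (a0 s0 : Int) :
    l.foldl
      (fun (st : Int × Int) _ =>
        (st.1 + PySem.List.pyGetD (pvCnt as_ cs) st.2 0, PySem.List.pyGetD (pvNxt as_ cs) st.2 0))
      (a0, s0)
    = (a0 + pvSum as_ cs l.length s0, (pvG as_ cs)^[l.length] s0) := by
  induction l generalizing a0 s0 with
  | nil => simp [pvSum]
  | cons x t ih =>
      simp only [List.foldl_cons, List.length_cons, ih]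
      rw [Function.iterate_succ_apply]
      have h1 : pvSum as_ cs (t.length + 1) s0
          = pvW as_ cs s0 + pvSum as_ cs t.length (pvG as_ cs s0) := rfl
      rw [h1]
      simp only [pvG, pvW, Prod.mk.injEq]
      exact ⟨by ring, trivial⟩

lemma foldl_inv {α β : Type} (P : β → Prop) (f : β → α → β)
    (hf : ∀ st x, P st → P (f st x)) : ∀ (l : List α) (st : β), P st → P (l.foldl f st)
  | [], _, h => h
  | x :: t, st, h => foldl_inv P f hf t (f st x) (hf st x h)

lemma pvRow_snd_bound (as_ cs : List Char) (hm : 0 < cs.length) (i : Int)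
    (h0 : 0 ≤ i) (h1 : i < (cs.length : Int)) :
    0 ≤ (pvRow as_ cs i).2 ∧ (pvRow as_ cs i).2 < (cs.length : Int) := by
  unfold pvRow
  refine foldl_inv (fun st : Int × Int => 0 ≤ st.2 ∧ st.2 < (cs.length : Int)) _ ?_ _ (0, i) ⟨h0, h1⟩
  rintro ⟨k, pos⟩ x ⟨hp0, hp1⟩
  dsimp only
  split_ifs with h1 h2
  · refine ⟨le_refl 0, ?_⟩
    show (0 : Int) < (cs.length : Int)
    exact_mod_cast hm
  · exact ⟨by omega, by omega⟩
  · exact ⟨hp0, hp1⟩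

lemma pvG_bound (as_ cs : List Char) (hm : 0 < cs.length) (s : Int)
    (h0 : 0 ≤ s) (h1 : s < (cs.length : Int)) :
    0 ≤ pvG as_ cs s ∧ pvG as_ cs s < (cs.length : Int) := by
  unfold pvG pvNxt
  rw [PySem.List.pyGetD_map_pyRange_of_nonneg _ _ _ _ h0 h1]
  exact pvRow_snd_bound as_ cs hm s h0 h1

lemma pvIt_bound (as_ cs : List Char) (hm : 0 < cs.length) (k : Nat) :
    0 ≤ pvIt as_ cs k ∧ pvIt as_ cs k < (cs.length : Int) := by
  induction k with
  | zero =>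
      refine ⟨le_refl 0, ?_⟩
      show (0 : Int) < (cs.length : Int)
      exact_mod_cast hm
  | succ k ih =>
      have h : pvIt as_ cs (k + 1) = pvG as_ cs (pvIt as_ cs k) := Function.iterate_succ_apply' _ _ _
      rw [h]
      exact pvG_bound as_ cs hm _ ih.1 ih.2

lemma pvLoopB_spec (as_ cs : List Char) (hm : 0 < cs.length) (b d : Int) (hb : 0 < b) :
    ∀ (fuel k : Nat) (first : PySem.Dict Int Int) (pre : List Int),
      k ≤ b.toNat →
      cs.length + 1 ≤ fuel + k →
      (∀ j1 j2, j1 < k → j2 < k → pvIt as_ cs j1 = pvIt as_ cs j2 → j1 = j2) →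
      (∀ j, j < k → first.get? (pvIt as_ cs j) = some (j : Int)) →
      (∀ x : Int, (∀ j, j < k → pvIt as_ cs j ≠ x) → first.get? x = none) →
      pre = (List.range (k + 1)).map (fun n => pvSum as_ cs n 0) →
      pvFinish b d
          (pvLoopB (pvCnt as_ cs) (pvNxt as_ cs) b fuel first pre (pvIt as_ cs k) (k : Int))
        = PySem.Int.floordiv (pvSum as_ cs b.toNat 0) d := by
  intro fuel
  induction fuel with
  | zero =>
      intro k first pre hk hfuel hdist hget hnone hpre
      exfalso
      -- impossible: the k visited states are distinct members of [0, len c), so k ≤ len c < fuel + k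
      have hsub : ((List.range k).map (pvIt as_ cs)) ⊆ PySem.List.pyRange 0 (cs.length : Int) 1 := by
        intro x hx
        simp only [List.mem_map, List.mem_range] at hx
        obtain ⟨j, hj, rfl⟩ := hx
        rw [PySem.List.mem_pyRange_one]
        exact pvIt_bound as_ cs hm j
      have hnd : ((List.range k).map (pvIt as_ cs)).Nodup := by
        refine List.Nodup.map_on ?_ List.nodup_range
        intro j1 h1 j2 h2 he
        exact hdist j1 j2 (List.mem_range.mp h1) (List.mem_range.mp h2) he
      have hle : ((List.range k).map (pvIt as_ cs)).length
          ≤ (PySem.List.pyRange 0 (cs.length : Int) 1).length := by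
        calc ((List.range k).map (pvIt as_ cs)).length
            = ((List.range k).map (pvIt as_ cs)).toFinset.card :=
              (List.toFinset_card_of_nodup hnd).symm
          _ ≤ (PySem.List.pyRange 0 (cs.length : Int) 1).toFinset.card :=
              Finset.card_le_card (fun x hx => List.mem_toFinset.mpr (hsub (List.mem_toFinset.mp hx)))
          _ ≤ (PySem.List.pyRange 0 (cs.length : Int) 1).length :=
              (PySem.List.pyRange 0 (cs.length : Int) 1).toFinset_card_le
      rw [List.length_map, List.length_range, PySem.List.length_pyRange_one] at hle
      omega
  | succ fuel ih =>
      intro k first pre hk hfuel hdist hget hnone hpre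
      by_cases hkb : (k : Int) = b
      · -- the loop exits with t = b; the answer is prefix[b]
        rw [pvLoopB, if_neg (by rintro ⟨-, hlt⟩; omega)]
        have hkN : k = b.toNat := by omega
        subst hpre
        simp only [pvFinish, if_pos hkb]
        rw [PySem.List.pyGetD_natCast, PySem.List.getD_map_range _ _ _ _ (by omega : k < k + 1), hkN]
      · have hklt : (k : Int) < b := by omega
        by_cases hrep : ∃ j, j < k ∧ pvIt as_ cs j = pvIt as_ cs k
        · -- the loop exits on a repeated state: cycle found
          obtain ⟨j, hj, hit⟩ := hrep
          have hgj : first.get? (pvIt as_ cs k) = some (j : Int) := by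
            rw [← hit]; exact hget j hj
          rw [pvLoopB, if_neg (by rintro ⟨hn, -⟩; rw [hgj] at hn; exact Option.some_ne_none _ hn)]
          simp only [pvFinish, if_neg hkb, hgj, Option.getD_some]
          subst hpre
          -- names for the cycle parameters
          have hbN : ((b.toNat : Nat) : Int) = b := Int.toNat_of_nonneg hb.le
          set N := b.toNat with hN
          have hkN : k < N := by omega
          set p' := k - j with hp'def
          have hp' : 0 < p' := by omega
          have hdm : p' * ((N - j) / p') + (N - j) % p' = N - j := Nat.div_add_mod (N - j) p'
          set q' := (N - j) / p' with hq'def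
          set r' := (N - j) % p' with hr'def
          have hr'lt : r' < p' := Nat.mod_lt _ hp'
          -- the three quantities Source B computes
          have h1 : b - (j : Int) = ((N - j : Nat) : Int) := by omega
          have h2 : (k : Int) - (j : Int) = ((p' : Nat) : Int) := by omega
          have hq : PySem.Int.floordiv (b - (j : Int)) ((k : Int) - (j : Int)) = ((q' : Nat) : Int) := by
            rw [h1, h2, PySem.Int.floordiv_natCast]
          have hr : b - (j : Int) - ((q' : Nat) : Int) * ((k : Int) - (j : Int)) = ((r' : Nat) : Int) := by
            rw [h2]
            have hc := congrArg (fun n : Nat => (n : Int)) hdm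
            push_cast [Nat.cast_sub (by omega : j ≤ N)] at hc
            linarith [hc, hbN]
          rw [hq, hr]
          have hidx : (j : Int) + ((r' : Nat) : Int) = ((j + r' : Nat) : Int) := by push_cast; ring
          rw [hidx]
          rw [PySem.List.pyGetD_natCast, PySem.List.pyGetD_natCast, PySem.List.pyGetD_natCast,
            PySem.List.getD_map_range _ _ _ _ (by omega : k < k + 1),
            PySem.List.getD_map_range _ _ _ _ (by omega : j < k + 1),
            PySem.List.getD_map_range _ _ _ _ (by omega : j + r' < k + 1)]
          congr 1
          -- the closed form equals the b-step sum
          have hcyc : (pvG as_ cs)^[p'] (pvIt as_ cs j) = pvIt as_ cs j := by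
            have hpk : p' + j = k := by omega
            calc (pvG as_ cs)^[p'] (pvIt as_ cs j)
                = (pvG as_ cs)^[p' + j] 0 := (Function.iterate_add_apply _ _ _ _).symm
              _ = pvIt as_ cs k := by rw [hpk]; rfl
              _ = pvIt as_ cs j := hit.symm
          have e1 : pvSum as_ cs N 0 = pvSum as_ cs j 0 + pvSum as_ cs (N - j) (pvIt as_ cs j) := by
            have h := pvSum_add as_ cs j (N - j) 0
            rw [Nat.add_sub_cancel' (by omega : j ≤ N)] at h
            exact h
          have e2 : pvSum as_ cs (N - j) (pvIt as_ cs j)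
              = (q' : Int) * pvSum as_ cs p' (pvIt as_ cs j) + pvSum as_ cs r' (pvIt as_ cs j) := by
            have hnj : N - j = q' * p' + r' := by
              rw [Nat.mul_comm q' p']; exact hdm.symm
            rw [hnj, pvSum_cycle as_ cs p' _ hcyc]
          have e3 : pvSum as_ cs k 0 = pvSum as_ cs j 0 + pvSum as_ cs p' (pvIt as_ cs j) := by
            have h := pvSum_add as_ cs j p' 0
            rw [(by omega : j + p' = k)] at h
            exact h
          have e4 : pvSum as_ cs (j + r') 0 = pvSum as_ cs j 0 + pvSum as_ cs r' (pvIt as_ cs j) :=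
            pvSum_add as_ cs j r' 0
          rw [e1, e2, e3, e4]
          ring
        · -- loop continues: one more step, fresh state recorded
          push Not at hrep
          have hnonek : first.get? (pvIt as_ cs k) = none :=
            hnone _ (fun j hj he => hrep j hj he)
          rw [pvLoopB, if_pos ⟨hnonek, hklt⟩]
          have hs' : PySem.List.pyGetD (pvNxt as_ cs) (pvIt as_ cs k) 0 = pvIt as_ cs (k + 1) := by
            show pvG as_ cs (pvIt as_ cs k) = pvIt as_ cs (k + 1)
            rw [pvIt, pvIt, Function.iterate_succ_apply']
          have ht' : (k : Int) + 1 = ((k + 1 : Nat) : Int) := by push_cast; ring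
          have hpre' : pre ++ [PySem.List.pyGetD pre (-1) 0 + PySem.List.pyGetD (pvCnt as_ cs) (pvIt as_ cs k) 0]
              = (List.range (k + 1 + 1)).map (fun n => pvSum as_ cs n 0) := by
            subst hpre
            rw [List.range_succ (n := k + 1), List.map_append]
            congr 1
            have hlast : PySem.List.pyGetD ((List.range (k + 1)).map (fun n => pvSum as_ cs n 0)) (-1) 0
                = pvSum as_ cs k 0 := by
              rw [List.range_succ, List.map_append]
              exact PySem.List.pyGetD_neg_one_append_singleton _ _ _
            rw [hlast]
            have : pvSum as_ cs (k + 1) 0 = pvSum as_ cs k 0 + pvW as_ cs (pvIt as_ cs k) := by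
              rw [pvSum_add]
              simp [pvSum, pvIt]
            simp only [List.map_singleton, this]
            rfl
          rw [hs', ht', hpre']
          apply ih (k + 1) (first.insert (pvIt as_ cs k) (k : Int))
          · omega
          · omega
          · intro j1 j2 hj1 hj2 he
            rcases Nat.lt_succ_iff_lt_or_eq.mp hj1 with hj1' | rfl
            · rcases Nat.lt_succ_iff_lt_or_eq.mp hj2 with hj2' | rfl
              · exact hdist j1 j2 hj1' hj2' he
              · exact absurd he (hrep j1 hj1')
            · rcases Nat.lt_succ_iff_lt_or_eq.mp hj2 with hj2' | rfl
              · exact absurd he.symm (hrep j2 hj2')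
              · rfl
          · intro j hj
            rcases Nat.lt_succ_iff_lt_or_eq.mp hj with hj' | rfl
            · rw [PySem.Dict.get?_insert_of_ne _ _ (hrep j hj')]
              exact hget j hj'
            · exact PySem.Dict.get?_insert_self _ _ _
          · intro x hx
            have hxk : pvIt as_ cs k ≠ x := hx k (by omega)
            rw [PySem.Dict.get?_insert_of_ne _ _ (fun h => hxk h.symm)]
            exact hnone x (fun j hj => hx j (by omega))
          · rfl

lemma find_max_p_closed (b d : Int) (a c : String) (hb : 0 < b) :
    find_max_p b d a c
      = PySem.Int.floordiv (pvSum a.toList c.toList b.toNat 0) d := by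
  show PySem.Int.floordiv
      ((PySem.List.pyRange 0 b 1).foldl
        (fun (st : Int × Int) _ =>
          (st.1 + PySem.List.pyGetD (pvCnt a.toList c.toList) st.2 0,
            PySem.List.pyGetD (pvNxt a.toList c.toList) st.2 0))
        (0, 0)).1 d = _
  rw [foldA]
  simp [PySem.List.length_pyRange_one]

lemma find_max_p_alt_closed (b d : Int) (a c : String) (hb : 0 < b) (hm : 0 < c.toList.length) :
    find_max_p_alt b d a c
      = PySem.Int.floordiv (pvSum a.toList c.toList b.toNat 0) d := by
  show (if b ≤ 0 then PySem.Int.floordiv 0 d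
    else pvFinish b d
      (pvLoopB (pvCnt a.toList c.toList) (pvNxt a.toList c.toList) b (c.toList.length + 1)
        (PySem.Dict.empty : PySem.Dict Int Int) [0] 0 0)) = _
  rw [if_neg (not_le.mpr hb)]
  exact pvLoopB_spec a.toList c.toList hm b d hb (c.toList.length + 1) 0
    PySem.Dict.empty [0] (by omega) (by omega)
    (by intro j1 j2 h1 _ _; omega)
    (by intro j hj; omega)
    (by intro x _; exact PySem.Dict.get?_empty x)
    (by rfl)

-- ===== VERDICT (by name: the statement is the Claim_ definition above) =====
theorem find_max_p_spec : Claim_equal_find_max_p := by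
  intro b d a c _ hpre
  show find_max_p b d a c = find_max_p_alt b d a c
  obtain ⟨hd, hbc⟩ := hpre
  by_cases hb : b ≤ 0
  · simp [find_max_p, find_max_p_alt, PySem.List.pyRange_one_eq_nil hb, hb]
  · push Not at hb
    have hc : c.toList ≠ [] := hbc.resolve_left (by omega)
    have hm : 0 < c.toList.length := List.length_pos_iff.mpr hc
    rw [find_max_p_closed b d a c hb, find_max_p_alt_closed b d a c hb hm]
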